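-- pv_equiv track=rewrite | github.com/paiml/depyler | examples/hard_realworld_formatter.py | make_indent
-- ===== SOURCE A (Python) =====
-- def make_indent(level: int, indent_size: int) -> str:
--     """Create indentation string for given level."""
--     result: str = ""
--     total: int = level * indent_size
--     idx: int = 0
--     while idx < total:
--         result = result + " "
--         idx = idx + 1
--     return result
-- ===== SOURCE B (Python) =====
-- def make_indent(level: int, indent_size: int) -> str:
--     """Create indentation string for given level (closed form)."""
--     return " " * (level * indent_size)
-- ===== Notes on version B (the rewrite author's own statement) =====
-- stated objective: faster
-- what changed: Replaced the char-by-char while-loop concatenation with the closed-form string repetition " " * (level * indent_size).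
import Mathlib
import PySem

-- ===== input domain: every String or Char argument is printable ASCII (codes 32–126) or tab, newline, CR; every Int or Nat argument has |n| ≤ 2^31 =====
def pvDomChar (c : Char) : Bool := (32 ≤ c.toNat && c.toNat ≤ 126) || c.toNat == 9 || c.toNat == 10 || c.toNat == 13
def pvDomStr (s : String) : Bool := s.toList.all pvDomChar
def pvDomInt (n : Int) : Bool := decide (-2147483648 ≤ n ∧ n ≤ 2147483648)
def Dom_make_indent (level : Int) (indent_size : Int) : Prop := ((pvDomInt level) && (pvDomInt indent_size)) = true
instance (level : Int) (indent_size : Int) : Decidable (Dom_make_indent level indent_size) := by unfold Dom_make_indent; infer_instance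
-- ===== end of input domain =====

-- B replaces A's char-by-char while-loop concatenation with the closed-form " " * (level*indent_size); return values agree on all inputs.

-- ===== PORT A =====
-- the while loop: fuel is the remaining iteration count (total - idx), exact since the loop runs while idx < total
def make_indent_loop (total : Int) (idx : Int) (result : String) : String :=
  if _h : idx < total then
    make_indent_loop total (idx + 1) (result ++ " ")
  else
    result
termination_by (total - idx).toNat
decreasing_by omega

def make_indent (level : Int) (indent_size : Int) : String :=
  let result : String := ""
  let total : Int := level * indent_size
  let idx : Int := 0
  make_indent_loop total idx result

-- ===== PORT B =====
-- " " * n : Python string repetition (empty for n ≤ 0)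
def make_indent_alt (level : Int) (indent_size : Int) : String :=
  String.ofList (List.replicate (level * indent_size).toNat ' ')

-- ===== PRECONDITION & SPEC =====
def Spec_make_indent (level : Int) (indent_size : Int) (out : String) : Prop := out = make_indent_alt level indent_size
instance (level : Int) (indent_size : Int) (out : String) : Decidable (Spec_make_indent level indent_size out) := by unfold Spec_make_indent; infer_instance

-- ===== CLAIM (what is proved, stated in full; the proofs are below) =====
def Claim_equal_make_indent : Prop := ∀ (level : Int) (indent_size : Int), Dom_make_indent level indent_size → Spec_make_indent level indent_size (make_indent level indent_size)

-- ===== LEMMAS AND PROOFS =====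
theorem make_indent_loop_eq (total idx : Int) (result : String) :
    make_indent_loop total idx result = result ++ String.ofList (List.replicate (total - idx).toNat ' ') := by
  have hgen : ∀ (n : Nat) (idx : Int) (result : String), (total - idx).toNat = n →
      make_indent_loop total idx result = result ++ String.ofList (List.replicate (total - idx).toNat ' ') := by
    intro n
    induction n with
    | zero =>
      intro idx result hn
      rw [make_indent_loop, dif_neg (by omega)]
      rw [hn]
      simp
    | succ n ih =>
      intro idx result hn
      rw [make_indent_loop, dif_pos (by omega), ih (idx + 1) (result ++ " ") (by omega)]
      have h1 : (total - idx).toNat = ((total - (idx + 1)).toNat + 1) := by omega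
      rw [h1]
      have h2 : List.replicate ((total - (idx + 1)).toNat + 1) ' '
          = ' ' :: List.replicate (total - (idx + 1)).toNat ' ' := rfl
      rw [h2, show (' ' :: List.replicate (total - (idx + 1)).toNat ' ')
          = [' '] ++ List.replicate (total - (idx + 1)).toNat ' ' from rfl,
        String.ofList_append, ← String.append_assoc]
  exact hgen (total - idx).toNat idx result rfl

-- ===== VERDICT (by name: the statement is the Claim_ definition above) =====
theorem make_indent_spec : Claim_equal_make_indent := by
  intro level indent_size _
  unfold Spec_make_indent make_indent make_indent_alt
  rw [make_indent_loop_eq]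
  simp
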